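-- pv_equiv track=rewrite | github.com/zahid-digitalhumanities/ucpc-poetry-archive | modules/analysis.py | split_verses
-- ===== SOURCE A (Python) =====
-- def split_verses(text):
--     """Ghazal text ko verses mein divide karein"""
--     if not text:
--         return []
--
--     lines = [l.strip() for l in text.split('\n') if l.strip()]
--     verses = []
--
--     i = 0
--     while i < len(lines):
--         if i + 1 < len(lines):
--             verses.append((lines[i], lines[i + 1]))
--             i += 2
--         else:
--             verses.append((lines[i], ""))
--             i += 1
--
--     return verses
-- ===== SOURCE B (Python) =====
-- def split_verses(text):
--     """Ghazal text ko verses mein divide karein"""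
--     if not text:
--         return []
--     lines = [l.strip() for l in text.split('\n') if l.strip()]
--     evens = lines[::2]
--     odds = lines[1::2]
--     if len(odds) < len(evens):
--         odds.append('')
--     return list(zip(evens, odds))
-- ===== Notes on version B (the rewrite author's own statement) =====
-- stated objective: idiomatic
-- what changed: Replaces the index-advancing while loop with two strided slices lines[::2]/lines[1::2] zipped together, padding the odd-position slice with one empty string when the line count is odd.
import Mathlib
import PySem

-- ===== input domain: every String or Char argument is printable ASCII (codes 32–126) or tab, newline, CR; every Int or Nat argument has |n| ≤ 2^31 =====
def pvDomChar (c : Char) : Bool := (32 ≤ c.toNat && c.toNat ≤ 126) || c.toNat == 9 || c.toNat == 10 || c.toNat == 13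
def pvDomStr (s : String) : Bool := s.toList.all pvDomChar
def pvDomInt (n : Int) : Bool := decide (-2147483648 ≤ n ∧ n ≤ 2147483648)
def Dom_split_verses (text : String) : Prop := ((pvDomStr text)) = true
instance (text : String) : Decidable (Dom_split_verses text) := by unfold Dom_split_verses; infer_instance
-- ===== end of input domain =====

-- B pairs the lines via two strided slices zipped together instead of A's index-advancing while loop (same cost; idiomatic rewrite).

-- ===== PORT A =====
-- the 'while i < len(lines)' loop: consumes two lines per step, one at the very end
def splitVersesLoop (lines : List String) : List (String × String) :=
  match lines with
  | [] => []
  | [x] => [(x, "")]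
  | x :: y :: rest => (x, y) :: splitVersesLoop rest

def split_verses (text : String) : List (String × String) :=
  if text = "" then []      -- 'if not text' (falsy string = empty)
  else
    let lines := (((PySem.Str.split? text "\n").getD []).filter
      (fun l => PySem.Str.strip l != "")).map PySem.Str.strip
    splitVersesLoop lines

-- ===== PORT B =====
def split_verses_alt (text : String) : List (String × String) :=
  if text = "" then []
  else
    let lines := (((PySem.Str.split? text "\n").getD []).filter
      (fun l => PySem.Str.strip l != "")).map PySem.Str.strip
    let evens := (PySem.List.slice? lines none none 2).getD []        -- lines[::2]
    let odds := (PySem.List.slice? lines (some 1) none 2).getD []     -- lines[1::2]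
    let odds := if odds.length < evens.length then odds ++ [""] else odds
    evens.zip odds

-- ===== PRECONDITION & SPEC =====
def Spec_split_verses (text : String) (out : List (String × String)) : Prop := out = split_verses_alt text
instance (text : String) (out : List (String × String)) : Decidable (Spec_split_verses text out) := by unfold Spec_split_verses; infer_instance

-- ===== CLAIM (what is proved, stated in full; the proofs are below) =====
def Claim_equal_split_verses : Prop := ∀ (text : String), Dom_split_verses text → Spec_split_verses text (split_verses text)

-- ===== LEMMAS AND PROOFS =====

-- the elements at even positions, i.e. what lines[::2] yields
def evensOf {α : Type} (xs : List α) : List α :=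
  match xs with
  | [] => []
  | [x] => [x]
  | x :: _ :: rest => x :: evensOf rest

theorem evensOf_cons {α : Type} (x : α) (r : List α) :
    evensOf (x :: r) = x :: evensOf r.tail := by
  cases r <;> simp [evensOf]

theorem filterMap_getElem_even {α : Type} :
    ∀ (xs : List α),
      List.filterMap (fun k => xs[2 * k]?) (List.range ((xs.length + 1) / 2)) = evensOf xs := by
  intro xs
  induction xs using evensOf.induct with
  | case1 => simp [evensOf]
  | case2 x => simp [evensOf]
  | case3 x y rest ih =>
    have hlen : ((x :: y :: rest).length + 1) / 2 = (rest.length + 1) / 2 + 1 := by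
      simp; omega
    rw [evensOf, hlen, List.range_succ_eq_map]
    simp only [List.filterMap_cons, List.filterMap_map]
    have h2 : ∀ k : ℕ, (x :: y :: rest)[2 * (k + 1)]? = rest[2 * k]? := by
      intro k
      rw [show 2 * (k + 1) = 2 * k + 1 + 1 by omega]
      simp
    simp only [Function.comp, Nat.succ_eq_add_one, h2]
    simp [ih]
theorem slice2_none {α : Type} (xs : List α) :
    PySem.List.slice? xs none none 2 = some (evensOf xs) := by
  rw [PySem.List.slice?]
  simp only [PySem.List.sliceIndices]
  norm_num
  rw [show (if 0 < xs.length then (((xs.length : ℤ) + 2 - 1) / 2).toNat else 0) = (xs.length + 1) / 2 by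
        rcases Nat.eq_zero_or_pos xs.length with h | h
        · simp [h]
        · rw [if_pos h, show ((xs.length : ℤ) + 2 - 1) = ((xs.length + 1 : ℕ) : ℤ) by push_cast; ring]
          norm_cast]
  simp only [show ∀ k : ℕ, ((2 : ℤ) * (k : ℤ)).toNat = 2 * k from fun k => by omega]
  exact filterMap_getElem_even xs
theorem slice2_one {α : Type} (xs : List α) :
    PySem.List.slice? xs (some 1) none 2 = some (evensOf xs.tail) := by
  rw [PySem.List.slice?]
  simp only [PySem.List.sliceIndices]
  norm_num
  cases xs with
  | nil => simp [evensOf]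
  | cons z r =>
    rw [show (min 1 ((z :: r).length : ℤ)) = 1 by simp]
    rw [show (if 1 < (z :: r).length then ((((z :: r).length : ℤ) - 1 + 2 - 1) / 2).toNat else 0)
          = (r.length + 1) / 2 by
        rcases Nat.eq_zero_or_pos r.length with h | h
        · simp [h]
        · rw [if_pos (by simp; omega)]
          rw [show (((z :: r).length : ℤ) - 1 + 2 - 1) = ((r.length + 1 : ℕ) : ℤ) by simp; ring]
          norm_cast]
    have h2 : ∀ k : ℕ, (z :: r)[(1 + (2:ℤ) * k).toNat]? = r[2 * k]? := by
      intro k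
      rw [show ((1 + (2:ℤ) * k)).toNat = 2 * k + 1 by omega]
      simp
    simp only [h2]
    exact filterMap_getElem_even r

theorem loop_eq_zip (ls : List String) :
    splitVersesLoop ls =
      (evensOf ls).zip
        (if (evensOf ls.tail).length < (evensOf ls).length
         then evensOf ls.tail ++ [""] else evensOf ls.tail) := by
  induction ls using splitVersesLoop.induct with
  | case1 => simp [splitVersesLoop, evensOf]
  | case2 x => simp [splitVersesLoop, evensOf]
  | case3 x y rest ih =>
    rw [splitVersesLoop]
    rw [show (x :: y :: rest).tail = y :: rest from rfl]
    rw [evensOf, evensOf_cons]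
    simp only [List.length_cons, add_lt_add_iff_right]
    split_ifs with h
    · rw [List.cons_append, List.zip_cons_cons, ih]
      simp [h]
    · rw [List.zip_cons_cons, ih]
      simp [h]

-- ===== VERDICT (by name: the statement is the Claim_ definition above) =====
theorem split_verses_spec : Claim_equal_split_verses := by
  intro text _
  unfold Spec_split_verses split_verses split_verses_alt
  split_ifs with h
  · rfl
  · simp only [slice2_none, slice2_one, Option.getD_some]
    exact loop_eq_zip _
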